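-- pv_equiv track=rewrite | github.com/serg-meus/zx_cmm | preprocessor.py | get_line_nums_to_delete
-- ===== SOURCE A (Python) =====
-- def is_define_or_enum(line):
--     return line.strip() and split_str(line.strip())[0] in ('#define', '#enum')
--
-- def get_line_nums_to_delete(lines):
--     state = 0
--     lines_to_delete = []
--     for i, line in enumerate(lines):
--         if state == 0 and is_define_or_enum(line):
--             lines_to_delete.append(i)
--             if line.strip().endswith('\\'):
--                 state = 1
--         elif state == 1:
--             lines_to_delete.append(i)
--             if not line.strip().endswith('\\'):
--                 state = 0
--     return lines_to_delete
--
-- def split_str(line, separators='\t .,;+-*/=[](){}'):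
--     ans = []
--     new_line = line
--     while new_line:
--         new_line = split_str_loop(new_line, separators, ans)
--     return ans
--
-- def split_str_loop(new_line, separators, ans):
--     (before, sep, after) = partition_str(new_line, separators)
--     ans += [sep] if not before else [before, sep] if sep else [before]
--     return after
--
-- def partition_str(line, separators):
--     for i, char in enumerate(line):
--         for sep in separators:
--             if char == sep:
--                 return (line[:i], line[i], line[i+1:])
--     return (line, None, None)
-- ===== SOURCE B (Python) =====
-- SEPARATORS = '\t .,;+-*/=[](){}'
--
-- def is_define_or_enum(line):
--     s = line.strip()
--     tok = ''
--     for ch in s: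
--         if ch in SEPARATORS:
--             break
--         tok += ch
--     return tok in ('#define', '#enum')
--
-- def get_line_nums_to_delete(lines):
--     res = []
--     n = len(lines)
--     i = 0
--     while i < n:
--         if is_define_or_enum(lines[i]):
--             res.append(i)
--             while lines[i].strip().endswith('\\') and i + 1 < n:
--                 i += 1
--                 res.append(i)
--         i += 1
--     return res
-- ===== Notes on version B (the rewrite author's own statement) =====
-- stated objective: faster
-- what changed: Replaced A's two-state machine over enumerate (which fully tokenises every line with split_str/partition_str, building the whole token list) by an index-driven outer loop with an inner continuation-consuming loop and a prefix-only first-token test that stops at the first separator.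
import Mathlib
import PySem

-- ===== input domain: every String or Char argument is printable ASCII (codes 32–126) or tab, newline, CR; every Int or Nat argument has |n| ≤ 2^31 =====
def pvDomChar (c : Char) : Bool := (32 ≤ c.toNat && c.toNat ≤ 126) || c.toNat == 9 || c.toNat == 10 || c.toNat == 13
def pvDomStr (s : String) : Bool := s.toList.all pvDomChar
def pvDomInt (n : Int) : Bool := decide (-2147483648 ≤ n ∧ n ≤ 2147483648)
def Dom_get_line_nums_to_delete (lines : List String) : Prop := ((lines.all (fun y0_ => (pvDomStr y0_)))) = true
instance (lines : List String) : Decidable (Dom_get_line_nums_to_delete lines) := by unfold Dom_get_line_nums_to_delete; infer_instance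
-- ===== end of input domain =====

-- B replaces A's two-state scan (which fully tokenises every line via split_str) by an
-- index-driven outer loop plus an inner continuation-consuming loop, with a prefix-only
-- first-token test (objective: faster by a constant factor, measured).

-- ===== PORT A =====

def pvSepsA : List Char := "\t .,;+-*/=[](){}".toList

-- partition_str: scan for the first separator char (iteration over enumerate(line))
def pvPartGo (cs : List Char) (i : Nat) (line : List Char) :
    List Char × Option (List Char) × Option (List Char) :=
  match cs with
  | [] => (line, none, none)
  | c :: rest =>
    if pvSepsA.contains c then (line.take i, some [c], some (line.drop (i + 1)))
    else pvPartGo rest (i + 1) line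

def pvPartition (line : List Char) : List Char × Option (List Char) × Option (List Char) :=
  pvPartGo line 0 line

-- ans += [sep] if not before else [before, sep] if sep else [before]
def pvSplitAdd (before : List Char) (sep : Option (List Char)) (ans : List (List Char)) :
    List (List Char) :=
  if before = [] then ans ++ [sep.getD []]
  else match sep with
    | some s => ans ++ [before, s]
    | none => ans ++ [before]

theorem pvPartGo_after_len (cs : List Char) (i : Nat) (line : List Char) (a : List Char)
    (hne : line ≠ []) (h : (pvPartGo cs i line).2.2 = some a) : a.length < line.length := by
  induction cs generalizing i with
  | nil => simp [pvPartGo] at h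
  | cons c rest ih =>
    simp only [pvPartGo] at h
    by_cases hc : pvSepsA.contains c = true
    · rw [if_pos hc] at h
      simp only [Option.some.injEq] at h
      have hlen : line.length ≠ 0 := by simpa using hne
      rw [← h, List.length_drop]
      omega
    · rw [if_neg hc] at h
      exact ih (i + 1) h

-- split_str: while new_line: new_line = split_str_loop(new_line, separators, ans)
def pvSplitGo (new_line : Option (List Char)) (ans : List (List Char)) : List (List Char) :=
  match new_line with
  | none => ans
  | some l =>
    if hl : l = [] then ans
    else
      let p := pvPartition l
      pvSplitGo p.2.2 (pvSplitAdd p.1 p.2.1 ans)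
termination_by (new_line.map List.length).getD 0
decreasing_by
  cases hp : (pvPartition l).2.2 with
  | none => simpa using Nat.pos_of_ne_zero (fun h => hl (List.length_eq_zero_iff.mp h))
  | some a =>
    simp only [Option.map_some, Option.getD_some]
    exact pvPartGo_after_len l 0 l a hl hp

def pvSplitStr (line : List Char) : List (List Char) := pvSplitGo (some line) []

def is_define_or_enum (line : String) : Bool :=
  let s := PySem.Str.strip line
  if s = "" then false
  else decide ((pvSplitStr s.toList).headD [] = "#define".toList ∨
               (pvSplitStr s.toList).headD [] = "#enum".toList)

def pvAGo (ps : List (Int × String)) (state : Int) (acc : List Int) : List Int :=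
  match ps with
  | [] => acc
  | (i, line) :: rest =>
    if state = 0 ∧ is_define_or_enum line then
      pvAGo rest (if PySem.Str.endswith (PySem.Str.strip line) "\\" then 1 else 0) (acc ++ [i])
    else if state = 1 then
      pvAGo rest (if ¬ PySem.Str.endswith (PySem.Str.strip line) "\\" then 0 else 1) (acc ++ [i])
    else pvAGo rest state acc

def get_line_nums_to_delete (lines : List String) : List Int :=
  pvAGo (PySem.List.enumerate lines 0) 0 []

-- ===== PORT B =====

def pvSepsB : List Char := "\t .,;+-*/=[](){}".toList

-- tok accumulation loop: stop at the first separator char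
def pvTokGo (cs : List Char) : List Char :=
  match cs with
  | [] => []
  | c :: rest => if pvSepsB.contains c then [] else c :: pvTokGo rest

def pvIsDefAlt (line : String) : Bool :=
  let t := pvTokGo (PySem.Str.strip line).toList
  t = "#define".toList || t = "#enum".toList

def pvEndsBS (line : String) : Bool := PySem.Str.endswith (PySem.Str.strip line) "\\"

-- inner while: consume continuation lines
def pvInner (lines : List String) (i : Nat) (acc : List Int) : Nat × List Int :=
  if h : pvEndsBS (lines.getD i "") ∧ i + 1 < lines.length then
    pvInner lines (i + 1) (acc ++ [(i : Int) + 1])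
  else (i, acc)
termination_by lines.length - i

theorem pvInner_fst_ge (lines : List String) (i : Nat) (acc : List Int) :
    i ≤ (pvInner lines i acc).1 := by
  fun_induction pvInner with
  | case1 i acc h ih => omega
  | case2 => simp

-- outer while i < n
def pvOuter (lines : List String) (i : Nat) (acc : List Int) : List Int :=
  if h : i < lines.length then
    if pvIsDefAlt (lines.getD i "") then
      let r := pvInner lines i (acc ++ [(i : Int)])
      pvOuter lines (r.1 + 1) r.2
    else pvOuter lines (i + 1) acc
  else acc
termination_by lines.length - i
decreasing_by
  · have := pvInner_fst_ge lines i (acc ++ [(i : Int)])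
    omega
  · omega

def get_line_nums_to_delete_alt (lines : List String) : List Int := pvOuter lines 0 []

-- ===== PRECONDITION & SPEC =====
def Spec_get_line_nums_to_delete (lines : List String) (out : List Int) : Prop := out = get_line_nums_to_delete_alt lines
instance (lines : List String) (out : List Int) : Decidable (Spec_get_line_nums_to_delete lines out) := by unfold Spec_get_line_nums_to_delete; infer_instance

-- ===== CLAIM (what is proved, stated in full; the proofs are below) =====
def Claim_equal_get_line_nums_to_delete : Prop := ∀ (lines : List String), Dom_get_line_nums_to_delete lines → Spec_get_line_nums_to_delete lines (get_line_nums_to_delete lines)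

-- ===== LEMMAS AND PROOFS =====

theorem pvSepsB_eq : pvSepsB = pvSepsA := rfl

theorem pvAGo_cons1 (i : Int) (x : String) (rest : List (Int × String)) (acc : List Int) :
    pvAGo ((i, x) :: rest) 1 acc
      = pvAGo rest (if pvEndsBS x then 1 else 0) (acc ++ [i]) := by
  cases hE : PySem.Chars.endswith (PySem.Chars.strip x.toList) ['\\'] <;>
    simp [pvAGo, pvEndsBS, hE]

theorem pvAGo_cons0_def (i : Int) (x : String) (rest : List (Int × String)) (acc : List Int)
    (hd : is_define_or_enum x = true) :
    pvAGo ((i, x) :: rest) 0 acc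
      = pvAGo rest (if pvEndsBS x then 1 else 0) (acc ++ [i]) := by
  cases hE : PySem.Chars.endswith (PySem.Chars.strip x.toList) ['\\'] <;>
    simp [pvAGo, pvEndsBS, hd, hE]

theorem pvAGo_cons0_ndef (i : Int) (x : String) (rest : List (Int × String)) (acc : List Int)
    (hd : is_define_or_enum x = false) :
    pvAGo ((i, x) :: rest) 0 acc = pvAGo rest 0 acc := by
  simp [pvAGo, hd]

theorem pvTokGo_eq (cs : List Char) :
    pvTokGo cs = cs.takeWhile (fun c => !(pvSepsA.contains c)) := by
  induction cs with
  | nil => rfl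
  | cons c rest ih =>
    by_cases hc : c ∈ pvSepsA
    · simp [pvTokGo, List.takeWhile_cons, pvSepsB_eq, hc]
    · simp [pvTokGo, List.takeWhile_cons, pvSepsB_eq, hc, ih]

theorem pvPartGo_fst (cs : List Char) : ∀ (i : Nat) (l : List Char),
    l.drop i = cs →
    (pvPartGo cs i l).1 = l.take i ++ cs.takeWhile (fun c => !(pvSepsA.contains c)) := by
  induction cs with
  | nil =>
    intro i l h
    have hle : l.length ≤ i := by
      have := congrArg List.length h
      simp [List.length_drop] at this
      omega
    simp [pvPartGo, List.take_of_length_le hle]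
  | cons c rest ih =>
    intro i l h
    have hget : l[i]? = some c := by
      have h2 : (l.drop i)[0]? = l[i+0]? := List.getElem?_drop
      rw [h] at h2
      simpa using h2.symm
    have hdrop : l.drop (i + 1) = rest := by
      have := congrArg List.tail h
      simpa [List.tail_drop] using this
    by_cases hc : c ∈ pvSepsA
    · simp [pvPartGo, hc, List.takeWhile_cons]
    · have hc' : ¬ pvSepsA.contains c = true := by simp [List.contains_eq_mem, hc]
      simp only [pvPartGo]
      rw [if_neg hc']
      rw [ih (i + 1) l hdrop, List.take_add_one, hget]
      simp [List.takeWhile_cons, hc]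

theorem pvSplitAdd_append (b : List Char) (s : Option (List Char)) (ans : List (List Char)) :
    pvSplitAdd b s ans = ans ++ pvSplitAdd b s [] := by
  unfold pvSplitAdd
  split_ifs with h
  · simp
  · cases s <;> simp

theorem pvSplitAdd_nil_cons (b : List Char) (s : Option (List Char)) :
    ∃ t, pvSplitAdd b s [] = (if b = [] then s.getD [] else b) :: t := by
  unfold pvSplitAdd
  split_ifs with h
  · exact ⟨[], rfl⟩
  · cases s
    · exact ⟨[], rfl⟩
    · exact ⟨_, rfl⟩

theorem pvSplitGo_append (n : Nat) : ∀ (nl : Option (List Char)) (ans : List (List Char)),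
    (nl.map List.length).getD 0 ≤ n → pvSplitGo nl ans = ans ++ pvSplitGo nl [] := by
  induction n with
  | zero =>
    intro nl ans h
    cases nl with
    | none => simp [pvSplitGo]
    | some l =>
      have : l = [] := List.length_eq_zero_iff.mp (Nat.le_zero.mp (by simpa using h))
      simp [pvSplitGo, this]
  | succ n ih =>
    intro nl ans h
    cases nl with
    | none => simp [pvSplitGo]
    | some l =>
      by_cases hl : l = []
      · simp [pvSplitGo, hl]
      · rw [pvSplitGo, pvSplitGo, dif_neg hl, dif_neg hl]
        have hm : ((pvPartition l).2.2.map List.length).getD 0 ≤ n := by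
          cases hp : (pvPartition l).2.2 with
          | none => simp
          | some a =>
            have := pvPartGo_after_len l 0 l a hl hp
            have hll : l.length ≤ n + 1 := by simpa using h
            simp only [Option.map_some, Option.getD_some]
            omega
        rw [ih _ (pvSplitAdd (pvPartition l).1 (pvPartition l).2.1 ans) hm,
            ih _ (pvSplitAdd (pvPartition l).1 (pvPartition l).2.1 []) hm,
            pvSplitAdd_append]
        simp

theorem pvSplitStr_head (l : List Char) (hl : l ≠ []) :
    (pvSplitStr l).headD [] =
      if (pvPartition l).1 = [] then (pvPartition l).2.1.getD [] else (pvPartition l).1 := by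
  unfold pvSplitStr
  rw [pvSplitGo, dif_neg hl]
  rw [pvSplitGo_append l.length _ _ (by
    cases hp : (pvPartition l).2.2 with
    | none => simp
    | some a =>
      have := pvPartGo_after_len l 0 l a hl hp
      simp only [Option.map_some, Option.getD_some]
      omega)]
  obtain ⟨t, ht⟩ := pvSplitAdd_nil_cons (pvPartition l).1 (pvPartition l).2.1
  simp [ht]

theorem pvDefineChars : ("#define" : String).toList = ['#','d','e','f','i','n','e'] := rfl
theorem pvEnumChars : ("#enum" : String).toList = ['#','e','n','u','m'] := rfl

set_option maxHeartbeats 1000000 in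
theorem pvIsDef_eq (x : String) : is_define_or_enum x = pvIsDefAlt x := by
  unfold is_define_or_enum pvIsDefAlt
  by_cases h0 : PySem.Str.strip x = ""
  · rw [if_pos h0, h0]
    have : ("" : String).toList = [] := rfl
    rw [this]
    simp [pvTokGo, pvDefineChars, pvEnumChars]
  · rw [if_neg h0]
    have hl : (PySem.Str.strip x).toList ≠ [] := by
      intro h
      exact h0 (String.toList_eq_nil_iff.mp h)
    rw [pvSplitStr_head _ hl, pvTokGo_eq]
    have hfst : (pvPartition (PySem.Str.strip x).toList).1 =
        (PySem.Str.strip x).toList.takeWhile (fun c => !(pvSepsA.contains c)) :=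
      pvPartGo_fst _ 0 _ List.drop_zero
    cases hlc : (PySem.Str.strip x).toList with
    | nil => exact absurd hlc hl
    | cons c cs =>
      by_cases hc : c ∈ pvSepsA
      · have hc' : pvSepsA.contains c = true := by simp [List.contains_eq_mem, hc]
        have htw : (c :: cs).takeWhile (fun c => !(pvSepsA.contains c)) = [] := by
          simp [List.takeWhile_cons, hc]
        have hsep : (pvPartition (c :: cs)).2.1 = some [c] := by
          simp only [pvPartition, pvPartGo]
          rw [if_pos hc']
        rw [hlc] at hfst
        rw [hfst, htw, if_pos rfl, hsep]
        simp [htw, pvDefineChars, pvEnumChars]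
      · have htw : (c :: cs).takeWhile (fun c => !(pvSepsA.contains c)) =
            c :: cs.takeWhile (fun c => !(pvSepsA.contains c)) := by
          simp [List.takeWhile_cons, hc]

        rw [hlc] at hfst
        rw [hfst, if_neg (by rw [htw]; simp)]
        simp [Bool.decide_or]

-- ===== main equivalence =====

theorem pvEnum_drop (lines : List String) (i : Nat) (h : i < lines.length) :
    (PySem.List.enumerate lines 0).drop i =
      ((i : Int), lines.getD i "") :: (PySem.List.enumerate lines 0).drop (i + 1) := by
  have hlen : i < (PySem.List.enumerate lines 0).length := by
    simpa [PySem.List.length_enumerate] using h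
  rw [List.drop_eq_getElem_cons hlen]
  congr 1
  rw [PySem.List.getElem_enumerate]
  simp [List.getD, List.getElem?_eq_getElem h]

theorem pvEnum_drop_nil (lines : List String) (i : Nat) (h : ¬ i < lines.length) :
    (PySem.List.enumerate lines 0).drop i = [] := by
  apply List.drop_eq_nil_of_le
  simpa [PySem.List.length_enumerate] using Nat.le_of_not_lt h

set_option maxHeartbeats 1000000 in
theorem pvMain (fuel : Nat) : ∀ (lines : List String) (i : Nat), lines.length - i < fuel →
    (∀ acc, pvAGo ((PySem.List.enumerate lines 0).drop i) 0 acc = pvOuter lines i acc) ∧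
    (∀ acc, i < lines.length →
      pvAGo ((PySem.List.enumerate lines 0).drop (i + 1))
          (if pvEndsBS (lines.getD i "") then 1 else 0) acc
        = pvOuter lines ((pvInner lines i acc).1 + 1) (pvInner lines i acc).2) := by
  induction fuel with
  | zero => intro lines i h; omega
  | succ fuel ih =>
    intro lines i hfuel
    have hq : ∀ acc, i < lines.length →
        pvAGo ((PySem.List.enumerate lines 0).drop (i + 1))
            (if pvEndsBS (lines.getD i "") then 1 else 0) acc
          = pvOuter lines ((pvInner lines i acc).1 + 1) (pvInner lines i acc).2 := by
      intro acc hi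
      by_cases he : pvEndsBS (lines.getD i "") = true
      · rw [if_pos he]
        by_cases h1 : i + 1 < lines.length
        · rw [pvEnum_drop lines (i + 1) h1, pvAGo_cons1]
          rw [pvInner, dif_pos ⟨he, h1⟩]
          have := (ih lines (i + 1) (by omega)).2 (acc ++ [(((i:Nat)+1 : Nat) : Int)]) h1
          rw [show ((i:Int) + 1) = (((i:Nat)+1 : Nat) : Int) by push_cast; ring]
          exact this
        · rw [pvEnum_drop_nil lines (i + 1) h1]
          rw [pvInner, dif_neg (by tauto)]
          rw [pvOuter, dif_neg h1]
          rfl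
      · rw [if_neg he]
        rw [pvInner, dif_neg (by tauto)]
        rw [pvOuter]
        by_cases h1 : i + 1 < lines.length
        · rw [dif_pos h1]
          have hp1 := (ih lines (i + 1) (by omega)).1 acc
          rw [hp1, pvOuter, dif_pos h1]
        · rw [dif_neg h1, pvEnum_drop_nil lines (i + 1) h1]
          rfl
    refine ⟨?_, hq⟩
    intro acc
    by_cases hi : i < lines.length
    · rw [pvEnum_drop lines i hi, pvOuter, dif_pos hi]
      by_cases hd : is_define_or_enum (lines.getD i "") = true
      · have hd' : pvIsDefAlt (lines.getD i "") = true := by rw [← pvIsDef_eq]; exact hd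
        rw [if_pos hd', pvAGo_cons0_def _ _ _ _ hd]
        exact hq (acc ++ [(i : Int)]) hi
      · have hd' : pvIsDefAlt (lines.getD i "") ≠ true := by rw [← pvIsDef_eq]; exact hd
        rw [if_neg hd', pvAGo_cons0_ndef _ _ _ _ (by simpa using hd)]
        exact (ih lines (i + 1) (by omega)).1 acc
    · rw [pvEnum_drop_nil lines i hi, pvOuter, dif_neg hi]
      rfl

-- ===== VERDICT (by name: the statement is the Claim_ definition above) =====
theorem get_line_nums_to_delete_spec : Claim_equal_get_line_nums_to_delete := by
  intro lines _
  unfold Spec_get_line_nums_to_delete get_line_nums_to_delete get_line_nums_to_delete_alt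
  have := (pvMain (lines.length + 1) lines 0 (by omega)).1 []
  simpa using this
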